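-- pv_equiv track=rewrite | github.com/sebsgitc/Encoder-Decoder | deep_vessel_segmentation.py | generate_chunk_coordinates
-- ===== SOURCE A (Python) =====
-- def generate_chunk_coordinates(volume_shape, chunk_size=64, overlap=8):
--     """
--     Generate coordinates for overlapping chunks to process large volumes
--
--     Args:
--         volume_shape: Shape of the volume (z, y, x)
--         chunk_size: Size of each chunk
--         overlap: Overlap between adjacent chunks
--
--     Returns:
--         List of (z_start, z_end, y_start, y_end, x_start, x_end) coordinates
--     """
--     z_steps = range(0, volume_shape[0], chunk_size - overlap)
--     y_steps = range(0, volume_shape[1], chunk_size - overlap)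
--     x_steps = range(0, volume_shape[2], chunk_size - overlap)
--
--     chunk_coords = []
--
--     for z in z_steps:
--         z_end = min(z + chunk_size, volume_shape[0])
--         z_start = z
--
--         for y in y_steps:
--             y_end = min(y + chunk_size, volume_shape[1])
--             y_start = y
--
--             for x in x_steps:
--                 x_end = min(x + chunk_size, volume_shape[2])
--                 x_start = x
--
--                 # Only include chunk if it's the full size or at the edge
--                 chunk_coords.append((z_start, z_end, y_start, y_end, x_start, x_end))
--
--     return chunk_coords
-- ===== SOURCE B (Python) =====
-- def generate_chunk_coordinates(volume_shape, chunk_size=64, overlap=8):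
--     """
--     Generate coordinates for overlapping chunks to process large volumes.
--
--     Instead of nested loops, computes the total number of chunks in closed
--     form (one ceiling division per axis) and runs a single flat loop,
--     decoding each linear index k into its (z, y, x) chunk indices by divmod.
--     """
--     step = chunk_size - overlap
--
--     def count(n):
--         # len(range(0, n, step)) in closed form (ceiling division toward step's sign)
--         return max(0, (n + step - (1 if step > 0 else -1)) // step)
--
--     nz = count(volume_shape[0])
--     ny = count(volume_shape[1])
--     nx = count(volume_shape[2])
--
--     coords = []
--     for k in range(nz * ny * nx):
--         ix = k % nx
--         r = k // nx
--         iy = r % ny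
--         iz = r // ny
--         z = iz * step
--         y = iy * step
--         x = ix * step
--         coords.append((z, min(z + chunk_size, volume_shape[0]),
--                        y, min(y + chunk_size, volume_shape[1]),
--                        x, min(x + chunk_size, volume_shape[2])))
--     return coords
-- ===== Notes on version B (the rewrite author's own statement) =====
-- stated objective: alternative
-- what changed: B computes the number of chunks per axis in closed form (one ceiling division each) and runs a single flat loop over the total count, decoding each linear index into (z,y,x) chunk indices by divmod, instead of A's three nested loops over range objects.
import Mathlib
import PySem

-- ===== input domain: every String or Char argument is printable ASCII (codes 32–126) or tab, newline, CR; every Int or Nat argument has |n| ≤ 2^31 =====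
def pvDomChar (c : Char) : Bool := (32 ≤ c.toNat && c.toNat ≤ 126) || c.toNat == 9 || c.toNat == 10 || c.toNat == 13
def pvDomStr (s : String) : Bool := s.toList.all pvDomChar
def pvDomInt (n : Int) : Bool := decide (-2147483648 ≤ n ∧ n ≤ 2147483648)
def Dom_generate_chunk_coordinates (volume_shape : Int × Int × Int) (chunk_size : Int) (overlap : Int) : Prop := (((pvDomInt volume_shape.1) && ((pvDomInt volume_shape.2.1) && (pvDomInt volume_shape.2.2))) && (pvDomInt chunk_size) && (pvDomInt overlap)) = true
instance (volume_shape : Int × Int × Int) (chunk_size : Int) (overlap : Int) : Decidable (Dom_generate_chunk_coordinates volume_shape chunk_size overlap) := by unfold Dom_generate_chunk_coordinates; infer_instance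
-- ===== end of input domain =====

-- B replaces A's three nested loops by a closed-form chunk count per axis and ONE flat loop
-- that decodes each linear index into (z,y,x) chunk indices by divmod (objective: alternative).

-- ===== PORT A =====
def generate_chunk_coordinates (volume_shape : Int × Int × Int) (chunk_size : Int) (overlap : Int) : List (Int × Int × Int × Int × Int × Int) :=
  let z_steps := PySem.List.pyRange 0 volume_shape.1 (chunk_size - overlap)
  let y_steps := PySem.List.pyRange 0 volume_shape.2.1 (chunk_size - overlap)
  let x_steps := PySem.List.pyRange 0 volume_shape.2.2 (chunk_size - overlap)
  z_steps.foldl (fun acc z =>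
    let z_end := min (z + chunk_size) volume_shape.1
    let z_start := z
    y_steps.foldl (fun acc y =>
      let y_end := min (y + chunk_size) volume_shape.2.1
      let y_start := y
      x_steps.foldl (fun acc x =>
        let x_end := min (x + chunk_size) volume_shape.2.2
        let x_start := x
        acc ++ [(z_start, z_end, y_start, y_end, x_start, x_end)]) acc) acc) []

-- ===== PORT B =====
-- Source B's inner helper: count(n) = max(0, (n + step - (1 if step > 0 else -1)) // step)
def pvCount (n step : Int) : Int :=
  max 0 (PySem.Int.floordiv (n + step - (if 0 < step then 1 else -1)) step)

def generate_chunk_coordinates_alt (volume_shape : Int × Int × Int) (chunk_size : Int) (overlap : Int) : List (Int × Int × Int × Int × Int × Int) :=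
  let step := chunk_size - overlap
  let nz := pvCount volume_shape.1 step
  let ny := pvCount volume_shape.2.1 step
  let nx := pvCount volume_shape.2.2 step
  (PySem.List.pyRange 0 (nz * ny * nx) 1).foldl (fun coords k =>
    let ix := PySem.Int.mod k nx
    let r := PySem.Int.floordiv k nx
    let iy := PySem.Int.mod r ny
    let iz := PySem.Int.floordiv r ny
    let z := iz * step
    let y := iy * step
    let x := ix * step
    coords ++ [(z, min (z + chunk_size) volume_shape.1,
                y, min (y + chunk_size) volume_shape.2.1,
                x, min (x + chunk_size) volume_shape.2.2)]) []

-- ===== PRECONDITION & SPEC =====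
-- Python A raises ValueError (range step 0) exactly when chunk_size == overlap; B divides by zero there too.
def Pre_generate_chunk_coordinates (volume_shape : Int × Int × Int) (chunk_size : Int) (overlap : Int) : Prop := chunk_size ≠ overlap
instance (volume_shape : Int × Int × Int) (chunk_size : Int) (overlap : Int) : Decidable (Pre_generate_chunk_coordinates volume_shape chunk_size overlap) := by unfold Pre_generate_chunk_coordinates; infer_instance
def pvWitness_generate_chunk_coordinates : (Int × Int × Int) × Int × Int := ((5, 4, 3), 3, 1)

def Spec_generate_chunk_coordinates (volume_shape : Int × Int × Int) (chunk_size : Int) (overlap : Int) (out : List (Int × Int × Int × Int × Int × Int)) : Prop := out = generate_chunk_coordinates_alt volume_shape chunk_size overlap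
instance (volume_shape : Int × Int × Int) (chunk_size : Int) (overlap : Int) (out : List (Int × Int × Int × Int × Int × Int)) : Decidable (Spec_generate_chunk_coordinates volume_shape chunk_size overlap out) := by unfold Spec_generate_chunk_coordinates; infer_instance

-- ===== CLAIM =====
def Claim_equal_generate_chunk_coordinates : Prop := ∀ (volume_shape : Int × Int × Int) (chunk_size : Int) (overlap : Int), Dom_generate_chunk_coordinates volume_shape chunk_size overlap → Pre_generate_chunk_coordinates volume_shape chunk_size overlap → Spec_generate_chunk_coordinates volume_shape chunk_size overlap (generate_chunk_coordinates volume_shape chunk_size overlap)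

-- ===== LEMMAS AND PROOFS =====

theorem pv_flatMap_single {a b : Type} (l : List a) (f : a → b) :
    l.flatMap (fun x => [f x]) = l.map f := by
  induction l with
  | nil => rfl
  | cons h t ih => simp [List.flatMap_cons, ih]

-- the Nat count pyRange uses internally, specialised to start 0
def pvCnt (n s : Int) : Nat :=
  if 0 < s then (if 0 < n then ((n + s - 1) / s).toNat else 0)
  else (if n < 0 then ((0 - n + -s - 1) / -s).toNat else 0)

theorem pyRange_zero_eq (n s : Int) (hs : s ≠ 0) :
    PySem.List.pyRange 0 n s = (List.range (pvCnt n s)).map (fun k => s * (k : Int)) := by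
  simp [PySem.List.pyRange, hs, pvCnt, pv_flatMap_single, List.map_map]

theorem pvCount_cast (n s : Int) (hs : s ≠ 0) :
    pvCount n s = ((pvCnt n s : Nat) : Int) := by
  unfold pvCount pvCnt
  rcases lt_or_gt_of_ne hs with hneg | hpos
  · have h1 : (if (0:Int) < s then (1:Int) else -1) = -1 := if_neg (by omega)
    have h2 : ¬ (0:Int) < s := by omega
    have hrw : PySem.Int.floordiv (n + s - -1) s = (0 - n + -s - 1) / -s := by
      rw [← PySem.Int.floordiv_neg_neg, PySem.Int.floordiv_eq_ediv_of_pos (by omega : (0:Int) < -s)]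
      congr 1; ring
    rw [h1, hrw]
    by_cases hn : n < 0
    · have hnn : 0 ≤ (0 - n + -s - 1) / -s := Int.ediv_nonneg (by omega) (by omega)
      simp only [if_neg h2, if_pos hn]
      rw [max_eq_right hnn, Int.toNat_of_nonneg hnn]
    · have hlt : (0 - n + -s - 1) / -s < 1 :=
        (Int.ediv_lt_iff_lt_mul (by omega : (0:Int) < -s)).mpr (by omega)
      simp only [if_neg h2, if_neg hn, Nat.cast_zero]
      omega
  · have h1 : (if (0:Int) < s then (1:Int) else -1) = 1 := if_pos hpos
    rw [h1, PySem.Int.floordiv_eq_ediv_of_pos hpos]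
    by_cases hn : 0 < n
    · have hnn : 0 ≤ (n + s - 1) / s := Int.ediv_nonneg (by omega) (by omega)
      simp only [if_pos hpos, if_pos hn]
      rw [max_eq_right hnn, Int.toNat_of_nonneg hnn]
    · have hlt : (n + s - 1) / s < 1 :=
        (Int.ediv_lt_iff_lt_mul hpos).mpr (by omega)
      simp only [if_pos hpos, if_neg hn, Nat.cast_zero]
      omega

theorem range_mul_flatMap {β : Type} (a b : Nat) (F : Nat → Nat → List β) :
    (List.range (a * b)).flatMap (fun k => F (k / b) (k % b))
      = (List.range a).flatMap (fun i => (List.range b).flatMap (F i)) := by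
  induction a with
  | zero => simp
  | succ a ih =>
    rw [show (a + 1) * b = a * b + b from by ring, List.range_add, List.flatMap_append, ih,
        List.range_succ, List.flatMap_append, List.flatMap_map]
    congr 1
    rw [List.flatMap_cons, List.flatMap_nil, List.append_nil]
    rw [List.flatMap_def, List.flatMap_def]
    congr 1
    apply List.map_congr_left
    intro j hj
    have hjb : j < b := List.mem_range.mp hj
    have hb : 0 < b := Nat.lt_of_le_of_lt (Nat.zero_le j) hjb
    have h1 : (a * b + j) / b = a := by
      rw [show a * b + j = j + b * a from by ring, Nat.add_mul_div_left _ _ hb,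
          Nat.div_eq_of_lt hjb, Nat.zero_add]
    have h2 : (a * b + j) % b = j := by
      rw [show a * b + j = j + b * a from by ring, Nat.add_mul_mod_self_left,
          Nat.mod_eq_of_lt hjb]
    rw [h1, h2]

theorem triple_decode {β : Type} (a b c : Nat) (f : Nat → Nat → Nat → β) :
    (List.range (a * b * c)).map (fun k => f (k / c / b) (k / c % b) (k % c))
      = (List.range a).flatMap (fun i => (List.range b).flatMap (fun j =>
          (List.range c).map (fun l => f i j l))) := by
  rw [← pv_flatMap_single (List.range (a * b * c)) (fun k => f (k / c / b) (k / c % b) (k % c))]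
  rw [range_mul_flatMap (a * b) c (fun r l => [f (r / b) (r % b) l])]
  rw [range_mul_flatMap a b (fun i j => (List.range c).flatMap (fun l => [f i j l]))]
  simp only [pv_flatMap_single]

-- ===== VERDICT =====
theorem generate_chunk_coordinates_spec : Claim_equal_generate_chunk_coordinates := by
  intro vs cs ov _ hpre
  show generate_chunk_coordinates vs cs ov = generate_chunk_coordinates_alt vs cs ov
  have hs : cs - ov ≠ 0 := sub_ne_zero.mpr hpre
  obtain ⟨d1, d2, d3⟩ := vs
  unfold generate_chunk_coordinates generate_chunk_coordinates_alt
  simp only [PySem.List.foldl_append_eq_flatMap, List.nil_append]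
  rw [pyRange_zero_eq d1 _ hs, pyRange_zero_eq d2 _ hs, pyRange_zero_eq d3 _ hs,
      pvCount_cast d1 _ hs, pvCount_cast d2 _ hs, pvCount_cast d3 _ hs]
  rw [show ((pvCnt d1 (cs - ov) : Int) * (pvCnt d2 (cs - ov) : Int) * (pvCnt d3 (cs - ov) : Int))
        = ((pvCnt d1 (cs - ov) * pvCnt d2 (cs - ov) * pvCnt d3 (cs - ov) : Nat) : Int) from by
      push_cast; ring]
  rw [PySem.List.pyRange_one]
  rw [show (((pvCnt d1 (cs - ov) * pvCnt d2 (cs - ov) * pvCnt d3 (cs - ov) : Nat) : Int) - 0).toNat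
        = pvCnt d1 (cs - ov) * pvCnt d2 (cs - ov) * pvCnt d3 (cs - ov) from by omega]
  simp only [zero_add, List.flatMap_map, PySem.Int.floordiv_natCast, PySem.Int.mod_natCast,
    pv_flatMap_single]
  rw [triple_decode (pvCnt d1 (cs - ov)) (pvCnt d2 (cs - ov)) (pvCnt d3 (cs - ov))
      (fun i j l => ((i : Int) * (cs - ov), min ((i : Int) * (cs - ov) + cs) d1,
                     (j : Int) * (cs - ov), min ((j : Int) * (cs - ov) + cs) d2,
                     (l : Int) * (cs - ov), min ((l : Int) * (cs - ov) + cs) d3))]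
  simp only [bind_pure_comp, List.map_eq_map, List.flatMap_map, List.map_map]
  ring_nf
  simp [Function.comp_def]
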